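-- pv_equiv track=rewrite | github.com/Godel99/PS | 프로그래머스/3/12987. 숫자 게임/숫자 게임.py | solution
-- ===== SOURCE A (Python) =====
-- def solution(A, B):
--     A.sort()
--     B.sort()
--
--     a = b = 0
--     win = 0
--
--     while a < len(A) and b < len(B):
--         if A[a] < B[b]:
--             win += 1
--             a += 1
--             b += 1
--         else:
--             b += 1
--     return win
-- ===== SOURCE B (Python) =====
-- def solution(A, B):
--     A.sort()
--     B.sort()
--     # Hall-deficiency counting: the maximum number of wins equals
--     # len(B) minus the largest shortfall of any prefix of sorted B,
--     # where the shortfall of the k smallest B's is k - #{a in A : a < B[k-1]}.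
--     deficit = 0
--     for k, b in enumerate(B, 1):
--         # count of A-elements strictly below b, by binary search in sorted A
--         lo, hi = 0, len(A)
--         while lo < hi:
--             mid = (lo + hi) // 2
--             if A[mid] < b:
--                 lo = mid + 1
--             else:
--                 hi = mid
--         short = k - lo
--         if short > deficit:
--             deficit = short
--     return len(B) - deficit
-- ===== Notes on version B (the rewrite author's own statement) =====
-- stated objective: alternative
-- what changed: B abandons A's greedy matching loop entirely: it computes the answer by a Hall-deficiency counting argument - len(B) minus the maximum shortfall k - #{a in A : a < B[k-1]} over prefixes of sorted B, each count found by binary search - so no pairing/discarding of elements happens at all; the proved theorem is that the greedy count equals this counting formula.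
import Mathlib
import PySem

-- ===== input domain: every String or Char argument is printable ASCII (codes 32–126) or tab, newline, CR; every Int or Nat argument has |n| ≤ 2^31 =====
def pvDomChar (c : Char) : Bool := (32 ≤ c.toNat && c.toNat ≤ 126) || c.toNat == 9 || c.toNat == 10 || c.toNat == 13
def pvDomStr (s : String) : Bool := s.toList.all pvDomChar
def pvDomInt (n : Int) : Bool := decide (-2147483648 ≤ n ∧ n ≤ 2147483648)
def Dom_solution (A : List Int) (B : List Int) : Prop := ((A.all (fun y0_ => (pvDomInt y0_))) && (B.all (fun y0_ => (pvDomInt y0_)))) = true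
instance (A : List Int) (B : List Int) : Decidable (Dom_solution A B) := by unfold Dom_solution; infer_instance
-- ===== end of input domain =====

-- B replaces A's greedy matching loop by a Hall-deficiency counting formula:
-- len(B) minus the largest prefix shortfall k - #{a in A : a < B[k-1]} over sorted B.
-- Both Pythons sort A and B in place; the equivalence proved is about the return value.

-- ===== PORT A =====
-- the while loop with indices a, b walking forward over the two sorted lists:
-- structural recursion consuming from the FRONT; `else` discards the current B-element
def pvGoA : List Int → List Int → Nat
  | a :: as, b :: bs => if a < b then 1 + pvGoA as bs else pvGoA (a :: as) bs
  | _, _ => 0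

def solution (A : List Int) (B : List Int) : Int :=
  ((pvGoA (PySem.List.sorted A (fun x => x) false) (PySem.List.sorted B (fun x => x) false) : Nat) : Int)

-- ===== PORT B =====
-- the inner while loop: binary search for the number of As-elements strictly below b
def pvBis (As : List Int) (b : Int) (lo hi : Int) : Int :=
  if h : lo < hi then
    let mid := PySem.Int.floordiv (lo + hi) 2
    if PySem.List.pyGetD As mid 0 < b then pvBis As b (mid + 1) hi else pvBis As b lo mid
  else lo
termination_by (hi - lo).toNat
decreasing_by
  · have hb := PySem.Int.floordiv_two_mid_bounds (lo := lo) (hi := hi) (le_of_lt h)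
    have hlt : PySem.Int.floordiv (lo + hi) 2 < hi :=
      (PySem.Int.floordiv_lt_iff_lt_mul (by omega)).mpr (by omega)
    omega
  · have hlt : PySem.Int.floordiv (lo + hi) 2 < hi :=
      (PySem.Int.floordiv_lt_iff_lt_mul (by omega)).mpr (by omega)
    omega

-- the for-loop over enumerate(B, 1) accumulating the maximal prefix shortfall `deficit`
def solution_alt (A : List Int) (B : List Int) : Int :=
  let As := PySem.List.sorted A (fun x => x) false
  let Bs := PySem.List.sorted B (fun x => x) false
  let deficit := (PySem.List.enumerate Bs 1).foldl
    (fun d kb =>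
      let short := kb.1 - pvBis As kb.2 0 (As.length : Int)
      if short > d then short else d) 0
  (Bs.length : Int) - deficit

-- ===== PRECONDITION & SPEC =====
def Spec_solution (A : List Int) (B : List Int) (out : Int) : Prop := out = solution_alt A B
instance (A : List Int) (B : List Int) (out : Int) : Decidable (Spec_solution A B out) := by unfold Spec_solution; infer_instance

-- ===== CLAIM (what is proved, stated in full; the proofs are below) =====
def Claim_equal_solution : Prop := ∀ (A : List Int) (B : List Int), Dom_solution A B → Spec_solution A B (solution A B)

-- ===== LEMMAS AND PROOFS =====

theorem pvGoA_nil_left (B : List Int) : pvGoA [] B = 0 := by cases B <;> rfl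
theorem pvGoA_nil_right (A : List Int) : pvGoA A [] = 0 := by cases A <;> rfl

-- appending one more (largest) B-element: the greedy adds one win iff the first
-- unmatched A-element (the greedy consumes A in order, one element per win) beats it
theorem pvGoA_snoc (B : List Int) : ∀ (A : List Int) (t : Int),
    pvGoA A (B ++ [t]) =
      if (A.drop (pvGoA A B)).head?.any (fun a => a < t) then pvGoA A B + 1 else pvGoA A B := by
  induction B with
  | nil =>
    intro A t
    cases A with
    | nil => simp [pvGoA]
    | cons a as =>
      by_cases h : a < t <;>
        simp [pvGoA, pvGoA_nil_right, h]
  | cons b bs ih =>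
    intro A t
    cases A with
    | nil => simp [pvGoA_nil_left]
    | cons a as =>
      by_cases h : a < b
      · simp only [pvGoA, List.cons_append, h, if_true]
        rw [ih as t, Nat.add_comm 1 (pvGoA as bs), List.drop_succ_cons]
        split_ifs <;> omega
      · have := ih (a :: as) t
        simpa [pvGoA, h] using this

-- in a sorted list, "the element at position w exists and is < t" is "w < #{a < t}"
theorem head_drop_lt_iff (t : Int) : ∀ (A : List Int) (w : Nat), A.Pairwise (· ≤ ·) →
    ((A.drop w).head?.any (fun a => a < t)
      = decide (w < A.countP (fun a => a < t))) := by
  intro A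
  induction A with
  | nil => intro w _; simp
  | cons a as ih =>
    intro w hp
    have hpa : as.Pairwise (· ≤ ·) := hp.of_cons
    cases w with
    | zero =>
      by_cases h : a < t
      · simp [h]
      · have hz : as.countP (fun a => a < t) = 0 := by
          rw [List.countP_eq_zero]
          intro x hx
          have := List.rel_of_pairwise_cons hp hx
          simp; omega
        simp [h, hz]
    | succ w' =>
      by_cases h : a < t
      · rw [List.drop_succ_cons, ih w' hpa]
        simp [h]
      · have hz : as.countP (fun a => a < t) = 0 := by
          rw [List.countP_eq_zero]
          intro x hx
          have := List.rel_of_pairwise_cons hp hx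
          simp; omega
        rw [List.drop_succ_cons, ih w' hpa]
        simp [h, hz]

-- the greedy never wins more often than there are A-elements below a bound on B
theorem pvGoA_le_countP (t : Int) : ∀ (B A : List Int), (∀ b ∈ B, b ≤ t) →
    pvGoA A B ≤ A.countP (fun a => a < t) := by
  intro B
  induction B with
  | nil => intro A _; simp [pvGoA_nil_right]
  | cons b bs ih =>
    intro A hB
    cases A with
    | nil => simp [pvGoA_nil_left]
    | cons a as =>
      by_cases h : a < b
      · have hat : a < t := lt_of_lt_of_le h (hB b (by simp))
        have := ih as (fun x hx => hB x (by simp [hx]))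
        simp only [pvGoA, h, if_true, List.countP_cons, hat]
        simp; omega
      · have := ih (a :: as) (fun x hx => hB x (by simp [hx]))
        simpa [pvGoA, h] using this

theorem enumerate_append_singleton {α : Type} (x : α) : ∀ (xs : List α) (s : Int),
    PySem.List.enumerate (xs ++ [x]) s = PySem.List.enumerate xs s ++ [(s + xs.length, x)] := by
  intro xs
  induction xs with
  | nil => intro s; simp [PySem.List.enumerate_cons, PySem.List.enumerate_nil]
  | cons y ys ih =>
    intro s
    simp only [List.cons_append, PySem.List.enumerate_cons, ih (s + 1), List.length_cons]
    have h1 : s + 1 + (ys.length : Int) = s + ((ys.length : Int) + 1) := by ring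
    push_cast
    rw [h1]

-- the Hall deficit accumulated by B's fold
def pvDef (As Bs : List Int) : Int :=
  (PySem.List.enumerate Bs 1).foldl
    (fun d kb =>
      let short := kb.1 - pvBis As kb.2 0 (As.length : Int)
      if short > d then short else d) 0

-- the binary search finds the count of elements < b of a sorted list, given that
-- that count lies in the search window [lo, hi] and the window is inside the list
theorem pvBis_eq_countP (As : List Int) (hA : As.Pairwise (· ≤ ·)) (b : Int) :
    ∀ (n : Nat) (lo hi : Int), (hi - lo).toNat ≤ n → 0 ≤ lo →
      lo ≤ (As.countP (fun a => a < b) : Int) →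
      (As.countP (fun a => a < b) : Int) ≤ hi → hi ≤ (As.length : Int) →
      pvBis As b lo hi = (As.countP (fun a => a < b) : Int) := by
  intro n
  induction n with
  | zero =>
    intro lo hi hn h0 h1 h2 h3
    rw [pvBis, dif_neg (by omega)]
    omega
  | succ n ihn =>
    intro lo hi hn h0 h1 h2 h3
    rw [pvBis]
    by_cases h : lo < hi
    · simp only [dif_pos h]
      have hb := PySem.Int.floordiv_two_mid_bounds (lo := lo) (hi := hi) (le_of_lt h)
      have hlt : PySem.Int.floordiv (lo + hi) 2 < hi :=
        (PySem.Int.floordiv_lt_iff_lt_mul (by omega)).mpr (by omega)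
      have hmlen : (PySem.Int.floordiv (lo + hi) 2).toNat < As.length := by omega
      have hmid : PySem.List.pyGetD As (PySem.Int.floordiv (lo + hi) 2) 0
          = As[(PySem.Int.floordiv (lo + hi) 2).toNat] := by
        exact PySem.List.pyGetD_eq_getElem As 0 (by omega) (by omega)
      have hiff := head_drop_lt_iff b As (PySem.Int.floordiv (lo + hi) 2).toNat hA
      rw [List.head?_drop, List.getElem?_eq_getElem hmlen] at hiff
      simp only [Option.any_some] at hiff
      have hpq := decide_eq_decide.mp hiff
      rw [hmid]
      by_cases hc : As[(PySem.Int.floordiv (lo + hi) 2).toNat] < b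
      · have hcc : (PySem.Int.floordiv (lo + hi) 2).toNat < As.countP (fun a => a < b) :=
          hpq.mp hc
        rw [if_pos hc]
        exact ihn _ hi (by omega) (by omega) (by omega) h2 h3
      · have hcc : ¬ (PySem.Int.floordiv (lo + hi) 2).toNat < As.countP (fun a => a < b) :=
          fun hcon => hc (hpq.mpr hcon)
        rw [if_neg hc]
        exact ihn lo _ (by omega) h0 h1 (by omega) (by omega)
    · rw [dif_neg h]
      omega

-- main theorem: on sorted lists the greedy count equals |B| minus the maximal prefix deficit
theorem pvMain (As : List Int) (hA : As.Pairwise (· ≤ ·)) :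
    ∀ (Bs : List Int), Bs.Pairwise (· ≤ ·) →
    ((pvGoA As Bs : Nat) : Int) = (Bs.length : Int) - pvDef As Bs := by
  intro Bs
  induction Bs using List.reverseRecOn with
  | nil => intro _; simp [pvGoA_nil_right, pvDef, PySem.List.enumerate_nil]
  | append_singleton B' bm ih =>
    intro hB
    rw [List.pairwise_append] at hB
    have hble : ∀ b ∈ B', b ≤ bm := fun b hb => hB.2.2 b hb bm (by simp)
    have ih' := ih hB.1
    have hle : pvGoA As B' ≤ As.countP (fun a => a < bm) := pvGoA_le_countP bm B' As hble
    have hsnoc := pvGoA_snoc B' As bm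
    rw [head_drop_lt_iff bm As (pvGoA As B') hA] at hsnoc
    have hdef : pvDef As (B' ++ [bm]) =
        (if (1 + (B'.length : Int)) - pvBis As bm 0 (As.length : Int) > pvDef As B'
         then (1 + (B'.length : Int)) - pvBis As bm 0 (As.length : Int)
         else pvDef As B') := by
      simp only [pvDef, enumerate_append_singleton, List.foldl_append, List.foldl_cons,
        List.foldl_nil]
    have hfc : pvBis As bm 0 (As.length : Int) = (As.countP (fun a => a < bm) : Int) :=
      pvBis_eq_countP As hA bm As.length 0 (As.length : Int) (by omega) le_rfl
        (by positivity) (by exact_mod_cast List.countP_le_length) le_rfl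
    rw [hsnoc, hdef, hfc]
    simp only [List.length_append, List.length_cons, List.length_nil]
    by_cases hwin : pvGoA As B' < As.countP (fun a => a < bm)
    · rw [if_pos (by simpa using hwin)]
      split_ifs with hs <;> push_cast at ih' hs ⊢ <;> omega
    · have heq : pvGoA As B' = As.countP (fun a => a < bm) :=
        le_antisymm hle (not_lt.mp hwin)
      rw [if_neg (by simpa using hwin)]
      split_ifs with hs <;> push_cast at ih' hs heq ⊢ <;> omega

-- ===== VERDICT (by name: the statement is the Claim_ definition above) =====
theorem solution_spec : Claim_equal_solution := by
  intro A B _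
  unfold Spec_solution solution solution_alt
  have hsA := PySem.List.sorted_pairwise A (fun x => x)
  have hsB := PySem.List.sorted_pairwise B (fun x => x)
  exact pvMain _ hsA _ hsB
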